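-- pv_equiv track=rewrite | github.com/gatorbacon/wrestledata-simple | scripts/upload_teams_to_dynamodb.py | check_team_id_uniqueness
-- ===== SOURCE A (Python) =====
-- from typing import Dict, List, Set
--
-- def check_team_id_uniqueness(team_ids: Dict[str, str], base_id: str, state: str) -> str:
--     """Check if a team ID is unique, and handle conflicts."""
--     if base_id not in team_ids:
--         return base_id
--
--     # Try adding state
--     state_id = f"{base_id}-{state}"
--     if state_id not in team_ids:
--         return state_id
--
--     # If still not unique, add a number
--     counter = 2
--     while f"{state_id}{counter}" in team_ids:
--         counter += 1
--     return f"{state_id}{counter}"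
-- ===== SOURCE B (Python) =====
-- def check_team_id_uniqueness(team_ids, base_id, state):
--     """Check if a team ID is unique, and handle conflicts.
--
--     Different strategy: build a one-pass index of the suffixes of the keys that
--     extend f"{base_id}-{state}", then search that small index (recursively) for
--     the first free numeric suffix, instead of formatting full candidate ids and
--     probing the whole mapping one by one."""
--     if base_id not in team_ids:
--         return base_id
--     state_id = f"{base_id}-{state}"
--     p = len(state_id)
--     sufs = {k[p:] for k in team_ids if k.startswith(state_id)}
--     if "" not in sufs:
--         return state_id
--     def first_free(n):
--         return n if str(n) not in sufs else first_free(n + 1)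
--     return f"{state_id}{first_free(2)}"
-- ===== Notes on version B (the rewrite author's own statement) =====
-- stated objective: alternative
-- what changed: B builds a one-pass index of the suffixes of keys that extend base_id-state (a set comprehension stripping the common prefix), then recursively searches that small index for the first free numeric suffix, instead of A's formatting each full candidate id and probing the whole mapping in a while loop.
import Mathlib
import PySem

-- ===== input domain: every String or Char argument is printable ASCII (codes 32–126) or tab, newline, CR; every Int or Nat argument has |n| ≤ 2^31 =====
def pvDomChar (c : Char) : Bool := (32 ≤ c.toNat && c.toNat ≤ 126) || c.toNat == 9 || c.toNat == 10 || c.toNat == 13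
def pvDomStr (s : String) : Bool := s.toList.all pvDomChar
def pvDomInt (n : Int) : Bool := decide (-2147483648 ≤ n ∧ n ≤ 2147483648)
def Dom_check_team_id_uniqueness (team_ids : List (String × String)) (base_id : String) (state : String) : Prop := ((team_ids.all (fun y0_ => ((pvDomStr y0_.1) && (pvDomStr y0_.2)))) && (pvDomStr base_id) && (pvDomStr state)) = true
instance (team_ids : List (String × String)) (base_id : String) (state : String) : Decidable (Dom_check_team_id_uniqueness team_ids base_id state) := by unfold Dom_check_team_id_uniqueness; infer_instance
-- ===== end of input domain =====

-- B builds a one-pass index of the stripped suffixes of the keys extending base_id-state and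
-- searches that index recursively, instead of A's formatting full candidates and probing the
-- whole mapping one by one (alternative decomposition, same cost).

-- ===== PORT A =====
-- A's while-loop, with fuel; Python's loop always terminates within keys.length+1 steps
-- (the candidates are pairwise distinct), so the fuel is never exhausted on real runs.
def pvLoopA (keys : List String) (state_id : String) (counter : Int) : Nat → String
  | 0 => state_id ++ PySem.Int.toStr counter
  | fuel + 1 =>
    if keys.contains (state_id ++ PySem.Int.toStr counter) then
      pvLoopA keys state_id (counter + 1) fuel
    else
      state_id ++ PySem.Int.toStr counter

def check_team_id_uniqueness (team_ids : List (String × String)) (base_id : String) (state : String) : String :=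
  let keys := team_ids.map Prod.fst
  if ¬ keys.contains base_id then
    base_id
  else
    let state_id := base_id ++ "-" ++ state
    if ¬ keys.contains state_id then
      state_id
    else
      pvLoopA keys state_id 2 (keys.length + 1)

-- ===== PORT B =====
-- the set comprehension {k[p:] for k in team_ids if k.startswith(state_id)}
def pvSufs (keys : List String) (state_id : String) (p : Int) : PySem.Set String :=
  keys.foldl
    (fun s k => if PySem.Str.startswith k state_id then PySem.Set.add s (PySem.Str.slice k (some p) none) else s)
    PySem.Set.empty

-- first_free, with fuel; B's Python recursion terminates within keys.length+1 calls
-- (the probed suffixes are pairwise distinct), so the fuel is never exhausted on real runs.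
def pvFirstFree (sufs : PySem.Set String) (n : Int) : Nat → Int
  | 0 => n
  | fuel + 1 =>
    if PySem.Set.contains sufs (PySem.Int.toStr n) then
      pvFirstFree sufs (n + 1) fuel
    else
      n

def check_team_id_uniqueness_alt (team_ids : List (String × String)) (base_id : String) (state : String) : String :=
  let keys := team_ids.map Prod.fst
  if ¬ keys.contains base_id then
    base_id
  else
    let state_id := base_id ++ "-" ++ state
    let p := PySem.Str.len state_id
    let sufs := pvSufs keys state_id p
    if ¬ PySem.Set.contains sufs "" then
      state_id
    else
      state_id ++ PySem.Int.toStr (pvFirstFree sufs 2 (keys.length + 1))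

-- ===== PRECONDITION & SPEC =====
def Spec_check_team_id_uniqueness (team_ids : List (String × String)) (base_id : String) (state : String) (out : String) : Prop := out = check_team_id_uniqueness_alt team_ids base_id state
instance (team_ids : List (String × String)) (base_id : String) (state : String) (out : String) : Decidable (Spec_check_team_id_uniqueness team_ids base_id state out) := by unfold Spec_check_team_id_uniqueness; infer_instance

-- ===== CLAIM (what is proved, stated in full; the proofs are below) =====
def Claim_equal_check_team_id_uniqueness : Prop := ∀ (team_ids : List (String × String)) (base_id : String) (state : String), Dom_check_team_id_uniqueness team_ids base_id state → Spec_check_team_id_uniqueness team_ids base_id state (check_team_id_uniqueness team_ids base_id state)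

-- ===== LEMMAS AND PROOFS =====

-- a key passes the comprehension's filter with suffix t exactly when it is state_id ++ t
lemma pv_key_shape (k state_id t : String) :
    (PySem.Str.startswith k state_id = true ∧
       PySem.Str.slice k (some (PySem.Str.len state_id)) none = t) ↔ k = state_id ++ t := by
  rw [PySem.Str.len_eq]
  constructor
  · rintro ⟨hpre, hslice⟩
    rw [PySem.Str.startswith_eq, PySem.Chars.startswith_iff] at hpre
    obtain ⟨r, hr⟩ := hpre
    apply String.toList_inj.mp
    rw [String.toList_append, ← hr]
    have : (PySem.Str.slice k (some ((state_id.toList.length : Nat) : Int)) none).toList = t.toList := by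
      rw [hslice]
    rw [PySem.Str.toList_slice, PySem.Chars.slice_eq_listSlice, PySem.List.slice_from_natCast,
        ← hr, List.drop_left] at this
    rw [this]
  · rintro rfl
    constructor
    · rw [PySem.Str.startswith_eq, PySem.Chars.startswith_iff]
      exact ⟨t.toList, by rw [String.toList_append]⟩
    · apply String.toList_inj.mp
      rw [PySem.Str.toList_slice, PySem.Chars.slice_eq_listSlice, PySem.List.slice_from_natCast,
          String.toList_append, List.drop_left]

-- membership in the comprehension's fold
lemma pv_mem_sufs_fold (keys : List String) (state_id : String) (p : Int)
    (s0 : PySem.Set String) (t : String) :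
    t ∈ keys.foldl
        (fun s k => if PySem.Str.startswith k state_id then PySem.Set.add s (PySem.Str.slice k (some p) none) else s)
        s0 ↔
      t ∈ s0 ∨ ∃ k ∈ keys, PySem.Str.startswith k state_id = true ∧
        PySem.Str.slice k (some p) none = t := by
  induction keys generalizing s0 with
  | nil => simp
  | cons k ks ih =>
    rw [List.foldl_cons]
    by_cases h : PySem.Str.startswith k state_id = true
    · rw [if_pos h, ih, PySem.Set.mem_add]
      simp only [List.mem_cons]
      constructor
      · rintro ((ht | rfl) | ⟨k', hk', hf⟩)
        · exact Or.inl ht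
        · exact Or.inr ⟨k, Or.inl rfl, h, rfl⟩
        · exact Or.inr ⟨k', Or.inr hk', hf⟩
      · rintro (ht | ⟨k', (rfl | hk'), hpre, rfl⟩)
        · exact Or.inl (Or.inl ht)
        · exact Or.inl (Or.inr rfl)
        · exact Or.inr ⟨k', hk', hpre, rfl⟩
    · rw [if_neg h, ih]
      simp only [List.mem_cons]
      constructor
      · rintro (ht | ⟨k', hk', hf⟩)
        · exact Or.inl ht
        · exact Or.inr ⟨k', Or.inr hk', hf⟩
      · rintro (ht | ⟨k', (rfl | hk'), hpre, hf⟩)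
        · exact Or.inl ht
        · exact absurd hpre h
        · exact Or.inr ⟨k', hk', hpre, hf⟩

-- membership transfer: a suffix t is indexed iff state_id ++ t is among the keys
lemma pv_contains_sufs (keys : List String) (state_id t : String) :
    PySem.Set.contains (pvSufs keys state_id (PySem.Str.len state_id)) t =
      keys.contains (state_id ++ t) := by
  rw [Bool.eq_iff_iff]
  simp only [PySem.Set.contains, pvSufs, List.contains_iff_mem]
  rw [pv_mem_sufs_fold]
  simp only [PySem.Set.empty]
  constructor
  · rintro (h | ⟨k, hk, hfilter⟩)
    · simp at h
    · rwa [(pv_key_shape k state_id t).mp hfilter] at hk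
  · intro h
    exact Or.inr ⟨state_id ++ t, h, (pv_key_shape _ state_id t).mpr rfl⟩

-- the two searches visit the same candidates and stop together
lemma pv_loop_eq (keys : List String) (state_id : String) :
    ∀ (fuel : Nat) (n : Int),
      pvLoopA keys state_id n fuel =
        state_id ++ PySem.Int.toStr (pvFirstFree (pvSufs keys state_id (PySem.Str.len state_id)) n fuel) := by
  intro fuel
  induction fuel with
  | zero => intro n; simp [pvLoopA, pvFirstFree]
  | succ fuel ih =>
    intro n
    simp only [pvLoopA, pvFirstFree, pv_contains_sufs]
    split_ifs with h
    · exact ih (n + 1)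
    · rfl

theorem check_team_id_uniqueness_spec : Claim_equal_check_team_id_uniqueness := by
  intro team_ids base_id state _
  unfold Spec_check_team_id_uniqueness check_team_id_uniqueness check_team_id_uniqueness_alt
  simp only []
  rw [show PySem.Set.contains
        (pvSufs (team_ids.map Prod.fst) (base_id ++ "-" ++ state)
          (PySem.Str.len (base_id ++ "-" ++ state))) "" =
      (team_ids.map Prod.fst).contains (base_id ++ "-" ++ state) by
    rw [pv_contains_sufs]; simp]
  split_ifs with h1 h2
  · exact pv_loop_eq (team_ids.map Prod.fst) (base_id ++ "-" ++ state) _ 2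
  · rfl
  · rfl
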